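-- pv_equiv track=rewrite | github.com/justTrueCodeWriter/info_security_labs | lab4/main.py | text_to_bitstring_7bit
-- ===== SOURCE A (Python) =====
-- BITS_PER_CHAR = 7
--
-- def int_to_bin_str(x: int, bits: int) -> str:
--     return format(x, '0{}b'.format(bits))
--
-- def text_to_bitstring_7bit(s: str) -> str:
--     """Преобразовать текст в битовую строку (7 бит на символ, MSB first)."""
--     bits = []
--     for ch in s:
--         code = ord(ch)
--         if code < 0 or code > 127:
--             raise ValueError(f"Символ {ch!r} имеет код {code} вне диапазона 0..127")
--         bits.append(int_to_bin_str(code, BITS_PER_CHAR))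
--     return "".join(bits)
-- ===== SOURCE B (Python) =====
-- BITS_PER_CHAR = 7
--
-- # 7-bit strings for codes 0..127, in numeric order, built once by Cartesian doubling.
-- _TABLE = [""]
-- for _ in range(BITS_PER_CHAR):
--     _TABLE = [p + b for p in _TABLE for b in "01"]
-- _TRANS = {code: bits for code, bits in enumerate(_TABLE)}
--
-- def text_to_bitstring_7bit(s: str) -> str:
--     """Преобразовать текст в битовую строку (7 бит на символ, MSB first)."""
--     for ch in s:
--         code = ord(ch)
--         if code < 0 or code > 127:
--             raise ValueError(f"Символ {ch!r} имеет код {code} вне диапазона 0..127")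
--     return s.translate(_TRANS)
-- ===== Notes on version B (the rewrite author's own statement) =====
-- stated objective: faster
-- what changed: B precomputes the 128-entry code-to-7-bits table once by Cartesian doubling, validates codes in a separate pass, and produces the whole output with one str.translate call instead of per-character format() conversion and join.
import Mathlib
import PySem

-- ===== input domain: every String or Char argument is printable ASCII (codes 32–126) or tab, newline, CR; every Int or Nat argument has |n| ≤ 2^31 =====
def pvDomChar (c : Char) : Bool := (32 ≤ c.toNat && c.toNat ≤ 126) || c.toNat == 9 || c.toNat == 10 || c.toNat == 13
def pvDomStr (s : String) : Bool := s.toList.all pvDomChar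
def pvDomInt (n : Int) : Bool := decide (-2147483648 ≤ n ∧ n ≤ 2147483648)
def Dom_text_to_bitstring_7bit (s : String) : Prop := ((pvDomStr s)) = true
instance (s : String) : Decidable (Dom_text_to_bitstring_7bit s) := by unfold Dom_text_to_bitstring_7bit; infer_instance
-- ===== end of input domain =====

-- B builds the 128-entry code→7-bit table once by Cartesian doubling and emits the output with a
-- single translate pass (table lookup per char), after a separate validation pass; constant-factor faster.


-- ===== PORT A =====
-- format(x, '0{bits}b') for x ≥ 0: binary digits left-padded with '0' to width `bits`.
-- (A only calls it with 0 ≤ x; ord(ch) is never negative.)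
def int_to_bin_str (x : Int) (bits : Nat) : List Char :=
  let d := PySem.Int.toBinChars x
  List.replicate (bits - d.length) '0' ++ d

-- the ValueError branch (code < 0 or code > 127) is unreachable on Dom (char codes 9/10/13/32..126)
def text_to_bitstring_7bit (s : String) : String :=
  let bits := s.toList.foldl (fun acc ch => acc ++ [int_to_bin_str (ch.toNat : Int) 7]) []
  String.mk bits.flatten

-- ===== PORT B =====
-- _TABLE: all 7-bit strings in numeric order, built by Cartesian doubling (Source B's module-level loop)
def pvTable : List (List Char) :=
  (List.range 7).foldl (fun t _ => t.flatMap (fun p => [p ++ ['0'], p ++ ['1']])) [[]]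

-- validation pass (same ValueError, unreachable on Dom), then str.translate with the code→bits dict:
-- translate maps each char to its table entry if the code is a key, else keeps the char.
def text_to_bitstring_7bit_alt (s : String) : String :=
  String.mk (s.toList.flatMap (fun ch => (pvTable[ch.toNat]?).getD [ch]))

-- ===== PRECONDITION & SPEC =====
def Spec_text_to_bitstring_7bit (s : String) (out : String) : Prop := out = text_to_bitstring_7bit_alt s
instance (s : String) (out : String) : Decidable (Spec_text_to_bitstring_7bit s out) := by unfold Spec_text_to_bitstring_7bit; infer_instance

-- ===== CLAIM (what is proved, stated in full; the proofs are below) =====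
def Claim_equal_text_to_bitstring_7bit : Prop := ∀ (s : String), Dom_text_to_bitstring_7bit s → Spec_text_to_bitstring_7bit s (text_to_bitstring_7bit s)

-- ===== LEMMAS AND PROOFS =====

-- per-code agreement: the table entry at a 7-bit code is A's formatted chunk
lemma table_eq : ∀ n : Nat, n < 128 → pvTable[n]? = some (int_to_bin_str (n : Int) 7) := by decide

lemma dom_lt (c : Char) (h : pvDomChar c = true) : c.toNat < 128 := by
  simp [pvDomChar] at h; omega

lemma main_eq (l : List Char) (h : ∀ c ∈ l, pvDomChar c = true) :
    (l.foldl (fun acc ch => acc ++ [int_to_bin_str (ch.toNat : Int) 7]) []).flatten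
      = l.flatMap (fun ch => (pvTable[ch.toNat]?).getD [ch]) := by
  rw [PySem.List.foldl_append_singleton_eq_map]
  simp only [List.nil_append, List.flatten_eq_flatMap, List.flatMap_map, id_eq]
  exact List.flatMap_congr (fun c hc => by rw [table_eq c.toNat (dom_lt c (h c hc))]; rfl)

-- ===== VERDICT (by name: the statement is the Claim_ definition above) =====
theorem text_to_bitstring_7bit_spec : Claim_equal_text_to_bitstring_7bit := by
  intro s hdom
  unfold Spec_text_to_bitstring_7bit text_to_bitstring_7bit text_to_bitstring_7bit_alt
  have h : ∀ c ∈ s.toList, pvDomChar c = true := by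
    simpa [Dom_text_to_bitstring_7bit, pvDomStr, List.all_eq_true] using hdom
  exact congrArg String.mk (main_eq s.toList h)
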